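-- pv_equiv track=rewrite | github.com/yuinaz/discord-bot-railway | scripts/xp_test/lib_ladder.py | senior_boundaries
-- ===== SOURCE A (Python) =====
-- SENIOR_PHASES = ["SMP","SMA","KULIAH"]
--
-- def parse_stage_idx(k: str) -> int:
--     ks = str(k).strip().upper()
--     for p in ("L","S"):
--         if ks.startswith(p):
--             try: return int(ks[len(p):])
--             except Exception: pass
--     try: return int(ks)
--     except Exception: return 999999
--
-- def order_stages(d):
--     return sorted(d.items(), key=lambda kv: parse_stage_idx(kv[0]))
--
-- def senior_boundaries(ladders: dict):
--     # Return cumulative thresholds for each stage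
--     bounds = []
--     total = 0
--     for phase in SENIOR_PHASES:
--         for (stage, need) in order_stages(ladders.get(phase, {})):
--             need = max(1, int(need))
--             bounds.append((phase, parse_stage_idx(stage), total, total+need))
--             total += need
--     return bounds
-- ===== SOURCE B (Python) =====
-- SENIOR_PHASES = ["SMP","SMA","KULIAH"]
--
-- def parse_stage_idx(k: str) -> int:
--     ks = str(k).strip().upper()
--     for p in ("L","S"):
--         if ks.startswith(p):
--             try: return int(ks[len(p):])
--             except Exception: pass
--     try: return int(ks)
--     except Exception: return 999999
--
-- def order_stages(d):
--     return sorted(d.items(), key=lambda kv: parse_stage_idx(kv[0]))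
--
-- def senior_boundaries(ladders: dict):
--     # Two-pass shape: flatten to normalized (phase, idx, need) entries,
--     # then a prefix-sum pass for the ends, then zip into boundaries.
--     entries = [(phase, parse_stage_idx(stage), max(1, int(need)))
--                for phase in SENIOR_PHASES
--                for stage, need in order_stages(ladders.get(phase, {}))]
--     ends = []
--     t = 0
--     for (_, _, need) in entries:
--         t += need
--         ends.append(t)
--     return [(p, i, e - n, e) for (p, i, n), e in zip(entries, ends)]
-- ===== Notes on version B (the rewrite author's own statement) =====
-- stated objective: alternative
-- what changed: A interleaves output-building with a running total in one nested loop; B first flattens phases/stages into normalized (phase, idx, need) entries, then computes cumulative ends in a separate prefix-sum pass and zips entries with their ends.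
import Mathlib
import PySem

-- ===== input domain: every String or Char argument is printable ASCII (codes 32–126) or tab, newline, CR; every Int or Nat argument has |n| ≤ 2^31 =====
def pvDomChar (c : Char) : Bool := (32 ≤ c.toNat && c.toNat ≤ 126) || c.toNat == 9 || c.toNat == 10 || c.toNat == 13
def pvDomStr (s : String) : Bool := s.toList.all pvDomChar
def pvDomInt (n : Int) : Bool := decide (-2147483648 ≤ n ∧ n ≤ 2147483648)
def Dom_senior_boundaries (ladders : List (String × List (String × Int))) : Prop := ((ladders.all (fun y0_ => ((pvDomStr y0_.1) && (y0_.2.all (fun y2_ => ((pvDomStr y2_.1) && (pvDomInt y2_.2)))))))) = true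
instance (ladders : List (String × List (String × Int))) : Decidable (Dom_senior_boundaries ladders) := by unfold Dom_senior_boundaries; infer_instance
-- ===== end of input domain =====

-- B builds the flat normalized entry list first and derives boundaries by a separate
-- prefix-sum pass, instead of A's single nested loop carrying the running total.

-- ===== PORT A =====
def SENIOR_PHASES : List String := ["SMP", "SMA", "KULIAH"]

-- parse_stage_idx: strip/upper, try int after prefix "L" then "S", then int(ks), else 999999
def parseStageIdx (k : String) : Int :=
  let ks := PySem.Chars.upper (PySem.Chars.strip k.toList)
  match (if PySem.Chars.startswith ks ['L'] then PySem.Int.ofChars? (ks.drop 1) else none) with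
  | some n => n
  | none =>
    match (if PySem.Chars.startswith ks ['S'] then PySem.Int.ofChars? (ks.drop 1) else none) with
    | some n => n
    | none => (PySem.Int.ofChars? ks).getD 999999

def orderStages (d : List (String × Int)) : List (String × Int) :=
  PySem.List.sorted d (fun kv => parseStageIdx kv.1)

def senior_boundaries (ladders : List (String × List (String × Int))) : List (String × Int × Int × Int) :=
  (SENIOR_PHASES.foldl (fun st phase =>
      (orderStages ((PySem.Dict.mk ladders).getD phase [])).foldl (fun st2 kv =>
        let need := max 1 kv.2
        (st2.1 ++ [(phase, parseStageIdx kv.1, st2.2, st2.2 + need)], st2.2 + need)) st)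
    (([] : List (String × Int × Int × Int)), (0 : Int))).1

-- ===== PORT B =====
def normEntries (ladders : List (String × List (String × Int))) : List (String × Int × Int) :=
  SENIOR_PHASES.flatMap (fun phase =>
    (orderStages ((PySem.Dict.mk ladders).getD phase [])).map
      (fun kv => (phase, parseStageIdx kv.1, max 1 kv.2)))

-- the 'ends' prefix-sum loop of Source B
def endsOf : List (String × Int × Int) → Int → List Int
  | [], _ => []
  | e :: rest, t => (t + e.2.2) :: endsOf rest (t + e.2.2)

def senior_boundaries_alt (ladders : List (String × List (String × Int))) : List (String × Int × Int × Int) :=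
  let entries := normEntries ladders
  List.zipWith (fun (e : String × Int × Int) (en : Int) => (e.1, e.2.1, en - e.2.2, en))
    entries (endsOf entries 0)

-- ===== PRECONDITION & SPEC =====
def Spec_senior_boundaries (ladders : List (String × List (String × Int))) (out : List (String × Int × Int × Int)) : Prop := out = senior_boundaries_alt ladders
instance (ladders : List (String × List (String × Int))) (out : List (String × Int × Int × Int)) : Decidable (Spec_senior_boundaries ladders out) := by unfold Spec_senior_boundaries; infer_instance

-- ===== CLAIM (what is proved, stated in full; the proofs are below) =====
def Claim_equal_senior_boundaries : Prop := ∀ (ladders : List (String × List (String × Int))), Dom_senior_boundaries ladders → Spec_senior_boundaries ladders (senior_boundaries ladders)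

-- ===== LEMMAS AND PROOFS =====

-- A's generic loop step over a normalized entry
def stepA (st : List (String × Int × Int × Int) × Int) (e : String × Int × Int) :
    List (String × Int × Int × Int) × Int :=
  (st.1 ++ [(e.1, e.2.1, st.2, st.2 + e.2.2)], st.2 + e.2.2)

lemma loopA_eq (L : List (String × Int × Int)) (acc : List (String × Int × Int × Int)) (t : Int) :
    (L.foldl stepA (acc, t)).1 =
      acc ++ List.zipWith (fun (e : String × Int × Int) (en : Int) => (e.1, e.2.1, en - e.2.2, en))
        L (endsOf L t) := by
  induction L generalizing acc t with
  | nil => simp [endsOf]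
  | cons e rest ih =>
    simp only [List.foldl_cons, stepA, endsOf, List.zipWith_cons_cons, ih]
    have : t + e.2.2 - e.2.2 = t := by ring
    simp [this, List.append_assoc]

lemma foldl_flatMap_stepA (phases : List String)
    (h : String → List (String × Int × Int)) (init : List (String × Int × Int × Int) × Int) :
    phases.foldl (fun st p => (h p).foldl stepA st) init =
      (phases.flatMap h).foldl stepA init := by
  induction phases generalizing init with
  | nil => rfl
  | cons p ps ih => simp [List.flatMap_cons, List.foldl_append, ih]

lemma inner_fold_eq (phase : String) (l : List (String × Int)) (st : List (String × Int × Int × Int) × Int) :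
    l.foldl (fun st2 kv =>
        let need := max 1 kv.2
        (st2.1 ++ [(phase, parseStageIdx kv.1, st2.2, st2.2 + need)], st2.2 + need)) st =
      (l.map (fun kv => (phase, parseStageIdx kv.1, max 1 kv.2))).foldl stepA st := by
  rw [List.foldl_map]
  rfl

-- ===== VERDICT (by name: the statement is the Claim_ definition above) =====
theorem senior_boundaries_spec : Claim_equal_senior_boundaries := by
  intro ladders _
  unfold Spec_senior_boundaries senior_boundaries senior_boundaries_alt
  have h1 : ∀ phase st,
      (orderStages ((PySem.Dict.mk ladders).getD phase [])).foldl (fun st2 (kv : String × Int) =>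
        let need := max 1 kv.2
        (st2.1 ++ [(phase, parseStageIdx kv.1, st2.2, st2.2 + need)], st2.2 + need)) st =
      ((orderStages ((PySem.Dict.mk ladders).getD phase [])).map
        (fun kv => (phase, parseStageIdx kv.1, max 1 kv.2))).foldl stepA st :=
    fun phase st => inner_fold_eq phase _ st
  calc (SENIOR_PHASES.foldl (fun st phase =>
          (orderStages ((PySem.Dict.mk ladders).getD phase [])).foldl (fun st2 kv =>
            let need := max 1 kv.2
            (st2.1 ++ [(phase, parseStageIdx kv.1, st2.2, st2.2 + need)], st2.2 + need)) st)
        (([] : List (String × Int × Int × Int)), (0 : Int))).1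
      = (SENIOR_PHASES.foldl (fun st phase =>
          ((orderStages ((PySem.Dict.mk ladders).getD phase [])).map
            (fun kv => (phase, parseStageIdx kv.1, max 1 kv.2))).foldl stepA st)
        (([] : List (String × Int × Int × Int)), (0 : Int))).1 := by
        congr 2
        funext st phase
        exact h1 phase st
    _ = ((normEntries ladders).foldl stepA (([] : List (String × Int × Int × Int)), (0 : Int))).1 := by
        rw [foldl_flatMap_stepA]; rfl
    _ = List.zipWith (fun (e : String × Int × Int) (en : Int) => (e.1, e.2.1, en - e.2.2, en))
          (normEntries ladders) (endsOf (normEntries ladders) 0) := by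
        rw [loopA_eq]; simp
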